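-- pv_equiv track=rewrite | github.com/munekf-byte/Optimization-of-Factory-Production | m_commander_v5_98_Final_Integrity.py | split_periods_3
-- ===== SOURCE A (Python) =====
-- def split_periods_3(model_data, sorted_dates):
--     if not sorted_dates: return []
--     first_date = sorted_dates[0]
--     prev_units = set(model_data[first_date].keys()) if first_date in model_data else set()
--     break_points = []
--     for d in sorted_dates:
--         curr_units = set(model_data[d].keys()) if d in model_data else set()
--         if curr_units and curr_units != prev_units:
--             break_points.append(d); prev_units = curr_units
--     if not break_points and len(sorted_dates) >= 3:
--         n = len(sorted_dates)
--         break_points = [sorted_dates[n//3], sorted_dates[2*n//3]]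
--     periods, start_idx = [], 0
--     for bp in break_points + [None]:
--         if bp:
--             end_idx = sorted_dates.index(bp)
--             periods.append(sorted_dates[start_idx:end_idx]); start_idx = end_idx
--         else: periods.append(sorted_dates[start_idx:])
--     return [p for p in periods if p][:3]
-- ===== SOURCE B (Python) =====
-- def split_periods_3(model_data, sorted_dates):
--     if not sorted_dates:
--         return []
--
--     def units(d):
--         return set(model_data[d].keys()) if d in model_data else set()
--
--     # build the periods directly: grow the last segment, or start a new one at a unit-set change
--     prev = units(sorted_dates[0])
--     segs = [[]]
--     broke = False
--     for d in sorted_dates: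
--         u = units(d)
--         if u and u != prev:
--             segs.append([d])
--             prev = u
--             broke = True
--         else:
--             segs[-1].append(d)
--     if not broke and len(sorted_dates) >= 3:
--         n = len(sorted_dates)
--         segs = [sorted_dates[:n // 3], sorted_dates[n // 3:2 * n // 3], sorted_dates[2 * n // 3:]]
--     return [s for s in segs if s][:3]
-- ===== Notes on version B (the rewrite author's own statement) =====
-- stated objective: alternative
-- what changed: A collects break DATES, re-locates each with list.index and slices the date list between located positions; B never computes break points or slices at all: it builds the periods themselves in one pass (grow the last segment or start a new one at a unit-set change), with the thirds fallback as three literal slices.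
-- outside the precondition, e.g. on split_periods_3({}, ['a', 'b', 'a']): A returns [['a'], ['a', 'b', 'a']], B returns [['a'], ['b'], ['a']]
import Mathlib
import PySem

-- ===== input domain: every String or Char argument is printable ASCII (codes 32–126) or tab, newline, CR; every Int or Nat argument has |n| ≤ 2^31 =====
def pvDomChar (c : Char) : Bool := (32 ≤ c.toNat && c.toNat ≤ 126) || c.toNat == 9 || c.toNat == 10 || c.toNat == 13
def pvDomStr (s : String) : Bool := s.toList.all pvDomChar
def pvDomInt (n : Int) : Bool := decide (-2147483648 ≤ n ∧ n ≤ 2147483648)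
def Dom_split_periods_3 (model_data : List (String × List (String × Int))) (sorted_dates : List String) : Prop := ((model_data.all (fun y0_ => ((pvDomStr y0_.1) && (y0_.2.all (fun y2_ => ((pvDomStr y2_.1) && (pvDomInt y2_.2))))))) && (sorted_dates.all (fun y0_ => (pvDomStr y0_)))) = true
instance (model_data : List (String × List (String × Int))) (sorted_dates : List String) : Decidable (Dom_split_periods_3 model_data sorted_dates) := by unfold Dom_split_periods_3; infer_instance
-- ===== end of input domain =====

-- B builds the periods directly in one accumulating pass (grow the last segment or open a
-- new one at each unit-set change) instead of A's break-date list + repeated list.index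
-- re-scans + slicing (objective: alternative algorithm; Pre_ excludes corners where A's
-- first-match .index / falsy-break-point behaviour is accidental).


-- ===== PORT A =====
-- set(model_data[d].keys()) if d in model_data else set()   (shared by both ports, same Python expression)
def pvUnits (model_data : List (String × List (String × Int))) (d : String) : PySem.Set String :=
  match (PySem.Dict.mk model_data).get? d with
  | some inner => PySem.Set.ofList (inner.map Prod.fst)
  | none => PySem.Set.empty

def split_periods_3 (model_data : List (String × List (String × Int))) (sorted_dates : List String) : List (List String) :=
  if sorted_dates = [] then []
  else
    let first_date := sorted_dates.headD ""
    let prev_units := pvUnits model_data first_date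
    -- for d in sorted_dates: if curr_units and curr_units != prev_units: break_points.append(d)
    let st := sorted_dates.foldl
      (fun (st : List String × PySem.Set String) d =>
        let curr := pvUnits model_data d
        if curr ≠ [] ∧ PySem.Set.equal curr st.2 = false then (st.1 ++ [d], curr) else st)
      ([], prev_units)
    let break_points :=
      if st.1 = [] ∧ 3 ≤ sorted_dates.length then
        let n : Int := (sorted_dates.length : Int)
        [(PySem.List.pyGet? sorted_dates (PySem.Int.floordiv n 3)).getD "",
         (PySem.List.pyGet? sorted_dates (PySem.Int.floordiv (2 * n) 3)).getD ""]
      else st.1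
    -- for bp in break_points + [None]: …  (sorted_dates.index(bp); slices by start_idx/end_idx)
    let res := (break_points.map some ++ [none]).foldl
      (fun (st : List (List String) × Int) bp =>
        match bp with
        | some b =>
          if b ≠ "" then
            let e : Int := (((PySem.List.index? sorted_dates b).getD 0 : Nat) : Int)
            (st.1 ++ [PySem.List.slice sorted_dates (some st.2) (some e)], e)
          else (st.1 ++ [PySem.List.slice sorted_dates (some st.2) none], st.2)
        | none => (st.1 ++ [PySem.List.slice sorted_dates (some st.2) none], st.2))
      ([], 0)
    (res.1.filter (fun p => p ≠ [])).take 3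

-- ===== PORT B =====
def split_periods_3_alt (model_data : List (String × List (String × Int))) (sorted_dates : List String) : List (List String) :=
  if sorted_dates = [] then []
  else
    let prev0 := pvUnits model_data (sorted_dates.headD "")
    -- segs = [[]]; broke = False; for d: either segs.append([d]) or segs[-1].append(d)
    let st := sorted_dates.foldl
      (fun (st : List (List String) × PySem.Set String × Bool) d =>
        let u := pvUnits model_data d
        if u ≠ [] ∧ PySem.Set.equal u st.2.1 = false then (st.1 ++ [[d]], u, true)
        else (st.1.dropLast ++ [st.1.getLastD [] ++ [d]], st.2.1, st.2.2))
      ([[]], prev0, false)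
    let n : Int := (sorted_dates.length : Int)
    let segs :=
      if st.2.2 = false ∧ 3 ≤ sorted_dates.length then
        [PySem.List.slice sorted_dates none (some (PySem.Int.floordiv n 3)),
         PySem.List.slice sorted_dates (some (PySem.Int.floordiv n 3)) (some (PySem.Int.floordiv (2 * n) 3)),
         PySem.List.slice sorted_dates (some (PySem.Int.floordiv (2 * n) 3)) none]
      else st.1
    (segs.filter (fun p => p ≠ [])).take 3

-- ===== PRECONDITION & SPEC =====
-- Pre_ excludes the corners where A's value is an accident of its implementation: when some
-- unit-set change exists, a date that carries units but occurs more than once or is the empty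
-- string (A re-finds break DATES with first-match list.index and tests them with truthiness);
-- and when NO unit-set change occurs (so the thirds fallback fires), a list whose n//3 or
-- 2n//3 date is a repeat of an earlier date or the empty string (same accidents there).
def Pre_split_periods_3 (model_data : List (String × List (String × Int))) (sorted_dates : List String) : Prop :=
  ((∀ d ∈ sorted_dates, pvUnits model_data d = [] ∨
      PySem.Set.equal (pvUnits model_data d) (pvUnits model_data (sorted_dates.headD "")) = true)
    ∨ (∀ d ∈ sorted_dates, pvUnits model_data d ≠ [] → sorted_dates.count d = 1 ∧ d ≠ ""))
  ∧ ((∀ d ∈ sorted_dates, pvUnits model_data d = [] ∨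
        PySem.Set.equal (pvUnits model_data d) (pvUnits model_data (sorted_dates.headD "")) = true) →
      3 ≤ sorted_dates.length →
      (sorted_dates.idxOf (sorted_dates.getD (sorted_dates.length / 3) "") = sorted_dates.length / 3
        ∧ sorted_dates.getD (sorted_dates.length / 3) "" ≠ ""
        ∧ sorted_dates.idxOf (sorted_dates.getD (2 * sorted_dates.length / 3) "") = 2 * sorted_dates.length / 3
        ∧ sorted_dates.getD (2 * sorted_dates.length / 3) "" ≠ ""))
instance (model_data : List (String × List (String × Int))) (sorted_dates : List String) : Decidable (Pre_split_periods_3 model_data sorted_dates) := by unfold Pre_split_periods_3; infer_instance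

def pvWitness_split_periods_3 : (List (String × List (String × Int))) × List String :=
  ([("a", [("u", 1)])], ["a", "b"])

def Spec_split_periods_3 (model_data : List (String × List (String × Int))) (sorted_dates : List String) (out : List (List String)) : Prop := out = split_periods_3_alt model_data sorted_dates
instance (model_data : List (String × List (String × Int))) (sorted_dates : List String) (out : List (List String)) : Decidable (Spec_split_periods_3 model_data sorted_dates out) := by unfold Spec_split_periods_3; infer_instance

-- ===== CLAIM (what is proved, stated in full; the proofs are below) =====
def Claim_equal_split_periods_3 : Prop := ∀ (model_data : List (String × List (String × Int))) (sorted_dates : List String), Dom_split_periods_3 model_data sorted_dates → Pre_split_periods_3 model_data sorted_dates → Spec_split_periods_3 model_data sorted_dates (split_periods_3 model_data sorted_dates)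

-- ===== LEMMAS AND PROOFS =====
def pvElemAt (sd : List String) (c : Int) : String := (PySem.List.pyGet? sd c).getD ""

def pvStepA (md : List (String × List (String × Int)))
    (st : List String × PySem.Set String) (d : String) : List String × PySem.Set String :=
  let curr := pvUnits md d
  if curr ≠ [] ∧ PySem.Set.equal curr st.2 = false then (st.1 ++ [d], curr) else st

-- proof-only intermediate: the cut-position fold (not part of either port)
def pvStepB (md : List (String × List (String × Int)))
    (st : List Int × PySem.Set String) (p : Int × String) : List Int × PySem.Set String :=
  let u := pvUnits md p.2
  if u ≠ [] ∧ PySem.Set.equal u st.2 = false then (st.1 ++ [p.1], u) else st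

def pvStepBB (md : List (String × List (String × Int)))
    (st : List (List String) × PySem.Set String × Bool) (d : String) :
    List (List String) × PySem.Set String × Bool :=
  let u := pvUnits md d
  if u ≠ [] ∧ PySem.Set.equal u st.2.1 = false then (st.1 ++ [[d]], u, true)
  else (st.1.dropLast ++ [st.1.getLastD [] ++ [d]], st.2.1, st.2.2)

def pvStepC (sd : List String)
    (s : List (List String) × Int) : Option String → List (List String) × Int
  | some b =>
    if b ≠ "" then
      let e : Int := (((PySem.List.index? sd b).getD 0 : Nat) : Int)
      (s.1 ++ [PySem.List.slice sd (some s.2) (some e)], e)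
    else (s.1 ++ [PySem.List.slice sd (some s.2) none], s.2)
  | none => (s.1 ++ [PySem.List.slice sd (some s.2) none], s.2)

def pvSliceLoop (sd : List String) (bps : List String) : List (List String) :=
  (((bps.map some ++ [none]).foldl (pvStepC sd) ([], 0)).1.filter (fun p => p ≠ [])).take 3

def pvSlices (sd : List String) (a : Int) : List Int → Int → List (List String)
  | [], e => [PySem.List.slice sd (some a) (some e)]
  | c :: cs, e => PySem.List.slice sd (some a) (some c) :: pvSlices sd c cs e

def pvZip (sd : List String) (cuts : List Int) : List (List String) :=
  ((((0 :: (cuts ++ [(sd.length : Int)])).zip ((0 :: (cuts ++ [(sd.length : Int)])).drop 1)).map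
    (fun ab => PySem.List.slice sd (some ab.1) (some ab.2))).filter (fun p => p ≠ [])).take 3

def pvA (md : List (String × List (String × Int))) (sd : List String) : List (List String) :=
  if sd = [] then []
  else
    pvSliceLoop sd
      (if (sd.foldl (pvStepA md) ([], pvUnits md (sd.headD ""))).1 = [] ∧ 3 ≤ sd.length then
        [pvElemAt sd (PySem.Int.floordiv (sd.length : Int) 3),
         pvElemAt sd (PySem.Int.floordiv (2 * (sd.length : Int)) 3)]
      else (sd.foldl (pvStepA md) ([], pvUnits md (sd.headD ""))).1)

def pvB (md : List (String × List (String × Int))) (sd : List String) : List (List String) :=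
  if sd = [] then []
  else
    ((if (sd.foldl (pvStepBB md) ([[]], pvUnits md (sd.headD ""), false)).2.2 = false ∧ 3 ≤ sd.length then
        [PySem.List.slice sd none (some (PySem.Int.floordiv (sd.length : Int) 3)),
         PySem.List.slice sd (some (PySem.Int.floordiv (sd.length : Int) 3))
           (some (PySem.Int.floordiv (2 * (sd.length : Int)) 3)),
         PySem.List.slice sd (some (PySem.Int.floordiv (2 * (sd.length : Int)) 3)) none]
      else (sd.foldl (pvStepBB md) ([[]], pvUnits md (sd.headD ""), false)).1).filter
        (fun p => p ≠ [])).take 3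

theorem pv_fold_sync (md : List (String × List (String × Int))) (sd : List String) :
    ∀ (l : List String) (k : Nat), l = sd.drop k →
    ∀ (prev : PySem.Set String) (bs : List String) (cs : List Int),
      bs = cs.map (pvElemAt sd) →
      (∀ c ∈ cs, 0 ≤ c ∧ c < (k : Int)) →
      (∀ c ∈ cs, pvUnits md (pvElemAt sd c) ≠ []) →
      (l.foldl (pvStepA md) (bs, prev)).1
        = ((PySem.List.enumerate l (k : Int)).foldl (pvStepB md) (cs, prev)).1.map (pvElemAt sd)
      ∧ (∀ c ∈ ((PySem.List.enumerate l (k : Int)).foldl (pvStepB md) (cs, prev)).1,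
          0 ≤ c ∧ c < ((k + l.length : Nat) : Int))
      ∧ (∀ c ∈ ((PySem.List.enumerate l (k : Int)).foldl (pvStepB md) (cs, prev)).1,
          pvUnits md (pvElemAt sd c) ≠ []) := by
  intro l
  induction l with
  | nil =>
    intro k hl prev bs cs hbs hbd hcu
    simp only [PySem.List.enumerate_nil, List.foldl_nil, List.length_nil, Nat.add_zero]
    exact ⟨hbs, hbd, hcu⟩
  | cons d t ih =>
    intro k hl prev bs cs hbs hbd hcu
    have hget : sd[k]? = some d := by
      have h0 : (sd.drop k)[0]? = sd[k + 0]? := List.getElem?_drop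
      rw [← hl] at h0
      simpa using h0.symm
    have ht : t = sd.drop (k + 1) := by
      rw [← List.tail_drop, ← hl]
      rfl
    have helem : pvElemAt sd ((k : Nat) : Int) = d := by
      simp [pvElemAt, hget]
    have hcast : ((k : Int) + 1) = (((k + 1 : Nat)) : Int) := by push_cast; ring
    rw [PySem.List.enumerate_cons, List.foldl_cons, List.foldl_cons, hcast]
    by_cases h : pvUnits md d ≠ [] ∧ PySem.Set.equal (pvUnits md d) prev = false
    · have hA : pvStepA md (bs, prev) d = (bs ++ [d], pvUnits md d) := by
        simp only [pvStepA, if_pos h]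
      have hB : pvStepB md (cs, prev) (((k : Nat) : Int), d) = (cs ++ [((k : Nat) : Int)], pvUnits md d) := by
        simp only [pvStepB, if_pos h]
      rw [hA, hB]
      have hbs' : bs ++ [d] = (cs ++ [((k : Nat) : Int)]).map (pvElemAt sd) := by
        simp [hbs, helem]
      have hbd' : ∀ c ∈ cs ++ [((k : Nat) : Int)], 0 ≤ c ∧ c < (((k + 1 : Nat)) : Int) := by
        intro c hc
        rcases List.mem_append.1 hc with hc | hc
        · have := hbd c hc; push_cast at this ⊢; omega
        · simp only [List.mem_singleton] at hc; subst hc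
          constructor
          · positivity
          · push_cast; omega
      have hcu' : ∀ c ∈ cs ++ [((k : Nat) : Int)], pvUnits md (pvElemAt sd c) ≠ [] := by
        intro c hc
        rcases List.mem_append.1 hc with hc | hc
        · exact hcu c hc
        · simp only [List.mem_singleton] at hc; subst hc
          rw [helem]; exact h.1
      have hres := ih (k + 1) ht (pvUnits md d) (bs ++ [d]) (cs ++ [((k : Nat) : Int)]) hbs' hbd' hcu'
      have hlen : (k + 1) + t.length = k + (d :: t).length := by
        simp [List.length_cons]; omega
      rw [hlen] at hres
      exact hres
    · have hA : pvStepA md (bs, prev) d = (bs, prev) := by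
        simp only [pvStepA, if_neg h]
      have hB : pvStepB md (cs, prev) (((k : Nat) : Int), d) = (cs, prev) := by
        simp only [pvStepB, if_neg h]
      rw [hA, hB]
      have hbd' : ∀ c ∈ cs, 0 ≤ c ∧ c < (((k + 1 : Nat)) : Int) := by
        intro c hc
        have := hbd c hc; push_cast at this ⊢; omega
      have hres := ih (k + 1) ht prev bs cs hbs hbd' hcu
      have hlen : (k + 1) + t.length = k + (d :: t).length := by
        simp [List.length_cons]; omega
      rw [hlen] at hres
      exact hres

theorem pv_len_mono (md : List (String × List (String × Int))) :
    ∀ (e : List (Int × String)) (s : List Int × PySem.Set String),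
      s.1.length ≤ ((e.foldl (pvStepB md) s)).1.length := by
  intro e
  induction e with
  | nil => intro s; simp
  | cons p t ih =>
    intro s
    rw [List.foldl_cons]
    refine le_trans ?_ (ih (pvStepB md s p))
    by_cases h : pvUnits md p.2 ≠ [] ∧ PySem.Set.equal (pvUnits md p.2) s.2 = false
    · have : pvStepB md s p = (s.1 ++ [p.1], pvUnits md p.2) := by
        simp only [pvStepB, if_pos h]
      rw [this]; simp
    · have : pvStepB md s p = s := by
        simp only [pvStepB, if_neg h]
      rw [this]

theorem pv_nocut (md : List (String × List (String × Int))) :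
    ∀ (l : List String) (k : Nat) (prev : PySem.Set String) (cs : List Int),
      ((PySem.List.enumerate l (k : Int)).foldl (pvStepB md) (cs, prev)).1 = cs →
      ∀ d ∈ l, pvUnits md d = [] ∨ PySem.Set.equal (pvUnits md d) prev = true := by
  intro l
  induction l with
  | nil => intro k prev cs _ d hd; exact absurd hd (List.not_mem_nil)
  | cons x t ih =>
    intro k prev cs h d hd
    rw [PySem.List.enumerate_cons, List.foldl_cons] at h
    by_cases hx : pvUnits md x ≠ [] ∧ PySem.Set.equal (pvUnits md x) prev = false
    · exfalso
      have hB : pvStepB md (cs, prev) (((k : Nat) : Int), x)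
          = (cs ++ [((k : Nat) : Int)], pvUnits md x) := by
        simp only [pvStepB, if_pos hx]
      rw [hB] at h
      have hm := pv_len_mono md (PySem.List.enumerate t ((k : Int) + 1))
        (cs ++ [((k : Nat) : Int)], pvUnits md x)
      rw [h] at hm
      simp at hm
    · have hB : pvStepB md (cs, prev) (((k : Nat) : Int), x) = (cs, prev) := by
        simp only [pvStepB, if_neg hx]
      rw [hB] at h
      rcases List.mem_cons.1 hd with rfl | hdt
      · by_cases hu : pvUnits md d = []
        · exact Or.inl hu
        · right
          simpa using (not_and.mp hx) hu
      · rw [show ((k : Int) + 1) = (((k + 1 : Nat)) : Int) by push_cast; ring] at h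
        exact ih (k + 1) prev cs h d hdt

theorem pv_nobreak_nocut (md : List (String × List (String × Int))) (sd : List String) :
    ∀ (l : List String) (k : Nat) (cs : List Int),
      (∀ d ∈ l, pvUnits md d = [] ∨
        PySem.Set.equal (pvUnits md d) (pvUnits md (sd.headD "")) = true) →
      ((PySem.List.enumerate l (k : Int)).foldl (pvStepB md)
        (cs, pvUnits md (sd.headD ""))).1 = cs := by
  intro l
  induction l with
  | nil => intro k cs _; simp
  | cons x t ih =>
    intro k cs h
    rw [PySem.List.enumerate_cons, List.foldl_cons]
    have hx : ¬ (pvUnits md x ≠ [] ∧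
        PySem.Set.equal (pvUnits md x) (pvUnits md (sd.headD "")) = false) := by
      rcases h x List.mem_cons_self with hx | hx
      · intro hcon; exact hcon.1 hx
      · intro hcon; rw [hx] at hcon; exact absurd hcon.2 (by simp)
    have hB : pvStepB md (cs, pvUnits md (sd.headD "")) (((k : Nat) : Int), x)
        = (cs, pvUnits md (sd.headD "")) := by
      simp only [pvStepB, if_neg hx]
    rw [hB, show ((k : Int) + 1) = (((k + 1 : Nat)) : Int) by push_cast; ring]
    exact ih (k + 1) cs (fun d hd => h d (List.mem_cons_of_mem _ hd))

theorem pv_slice_from_eq (l : List String) (st : Int) (h : 0 ≤ st) :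
    PySem.List.slice l (some st) none = PySem.List.slice l (some st) (some (l.length : Int)) := by
  have h1 : PySem.List.slice l (some st) none = l.drop st.toNat :=
    PySem.List.slice_from (xs := l) (a := st) h
  have h2 : PySem.List.slice l (some st) (some (l.length : Int))
      = (l.drop st.toNat).take ((l.length : Int).toNat - st.toNat) :=
    PySem.List.slice_toNat (xs := l) (a := st) (b := (l.length : Int)) h (Int.natCast_nonneg _)
  rw [h1, h2, Int.toNat_natCast, List.take_of_length_le (by simp)]

theorem pv_elem_eq (sd : List String) (c : Int) (h0 : 0 ≤ c) (h1 : c < (sd.length : Int)) :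
    pvElemAt sd c = sd[c.toNat]'(by omega) := by
  have h := PySem.List.pyGet?_eq_some_getElem (xs := sd) (i := c) h0 h1
  simp [pvElemAt, h]

theorem pv_index_count (sd : List String) (i : Nat) (hi : i < sd.length)
    (h1 : sd.count (sd[i]'hi) = 1) : PySem.List.index? sd (sd[i]'hi) = some i := by
  apply (PySem.List.index?_eq_some_iff (xs := sd) (v := sd[i]'hi) (k := i)).mpr
  refine ⟨sd.take i, sd.drop (i + 1), ?_, ?_, ?_⟩
  · conv_lhs => rw [← List.take_append_drop i sd, List.drop_eq_getElem_cons hi]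
  · simp [Nat.min_eq_left (Nat.le_of_lt hi)]
  · intro hmem
    obtain ⟨v, hveq⟩ : ∃ v, v = sd[i]'hi := ⟨_, rfl⟩
    rw [← hveq] at h1 hmem
    have hv : sd = sd.take i ++ v :: sd.drop (i + 1) := by
      rw [hveq]
      conv_lhs => rw [← List.take_append_drop i sd, List.drop_eq_getElem_cons hi]
    rw [hv, List.count_append, List.count_cons_self] at h1
    have htk : 1 ≤ (sd.take i).count v := List.one_le_count_iff.mpr hmem
    omega

theorem pv_index_mem (sd : List String) (i : Nat) (hi : i < sd.length)
    (hidx : sd.idxOf (sd[i]'hi) = i) : PySem.List.index? sd (sd[i]'hi) = some i := by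
  have hmem : sd[i]'hi ∈ sd := List.getElem_mem hi
  have hsome : (PySem.List.index? sd (sd[i]'hi)).isSome :=
    (PySem.List.index?_isSome_iff (xs := sd) (v := sd[i]'hi)).mpr hmem
  obtain ⟨j, hj⟩ := Option.isSome_iff_exists.mp hsome
  have hj' : List.idxOf? (sd[i]'hi) sd = some j := by
    rw [← PySem.List.index?_eq_idxOf?]; exact hj
  have : sd.idxOf (sd[i]'hi) = j := by
    rw [List.idxOf_eq_getD_idxOf?, hj']; rfl
  rw [hj, ← hidx, this]

theorem pv_periods (sd : List String) :
    ∀ (cuts : List Int) (acc : List (List String)) (st : Int), 0 ≤ st →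
      (∀ c ∈ cuts, 0 ≤ c ∧ c < (sd.length : Int) ∧ pvElemAt sd c ≠ "" ∧
        PySem.List.index? sd (pvElemAt sd c) = some c.toNat) →
      (((cuts.map (pvElemAt sd)).map some ++ [none]).foldl (pvStepC sd) (acc, st)).1
      = acc ++ ((st :: (cuts ++ [(sd.length : Int)])).zip (cuts ++ [(sd.length : Int)])).map
          (fun ab => PySem.List.slice sd (some ab.1) (some ab.2)) := by
  intro cuts
  induction cuts with
  | nil =>
    intro acc st hst _
    simp only [List.map_nil, List.nil_append, List.foldl_cons, List.foldl_nil,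
      List.zip_cons_cons, List.zip_nil_right]
    simp [pvStepC, pv_slice_from_eq sd st hst]
  | cons c rest ih =>
    intro acc st hst hbd
    have hc := hbd c List.mem_cons_self
    have estep : pvStepC sd (acc, st) (some (pvElemAt sd c))
        = (acc ++ [PySem.List.slice sd (some st) (some c)], c) := by
      simp only [pvStepC]
      rw [if_pos hc.2.2.1, hc.2.2.2]
      simp [Int.toNat_of_nonneg hc.1]
    simp only [List.map_cons, List.cons_append, List.foldl_cons]
    rw [estep, ih (acc ++ [PySem.List.slice sd (some st) (some c)]) c hc.1
      (fun x hx => hbd x (List.mem_cons_of_mem _ hx))]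
    simp [List.zip_cons_cons, List.append_assoc]

theorem pv_zip_eq (sd : List String) (cuts : List Int)
    (hcut : ∀ c ∈ cuts, 0 ≤ c ∧ c < (sd.length : Int) ∧ pvElemAt sd c ≠ "" ∧
      PySem.List.index? sd (pvElemAt sd c) = some c.toNat) :
    pvSliceLoop sd (cuts.map (pvElemAt sd)) = pvZip sd cuts := by
  unfold pvSliceLoop pvZip
  rw [pv_periods sd cuts [] 0 le_rfl hcut]
  simp

-- B-side lemmas: the accumulated segments are exactly the slices between cut positions
theorem pv_slice_snoc (sd : List String) (a : Int) (k : Nat) (d : String)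
    (ha : 0 ≤ a) (hak : a ≤ (k : Int)) (hk : sd[k]? = some d) :
    PySem.List.slice sd (some a) (some (k : Int)) ++ [d]
      = PySem.List.slice sd (some a) (some ((k : Int) + 1)) := by
  have hc : ((k : Int) + 1) = (((k + 1 : Nat)) : Int) := by push_cast; ring
  rw [hc, PySem.List.slice_toNat (xs := sd) (a := a) (b := ((k : Nat) : Int)) ha (Int.natCast_nonneg _),
    PySem.List.slice_toNat (xs := sd) (a := a) (b := (((k + 1 : Nat)) : Int)) ha (Int.natCast_nonneg _),
    Int.toNat_natCast, Int.toNat_natCast]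
  have hle : a.toNat ≤ k := by omega
  have hsub : k + 1 - a.toNat = (k - a.toNat) + 1 := by omega
  rw [hsub, List.take_add_one]
  have : (sd.drop a.toNat)[k - a.toNat]? = some d := by
    rw [List.getElem?_drop]
    rw [show a.toNat + (k - a.toNat) = k by omega]
    exact hk
  simp [this]

theorem pv_slices_ne_nil (sd : List String) (a : Int) (cuts : List Int) (e : Int) :
    pvSlices sd a cuts e ≠ [] := by
  cases cuts <;> simp [pvSlices]

theorem pv_slices_snoc (sd : List String) :
    ∀ (cuts : List Int) (a e e' : Int),
      pvSlices sd a (cuts ++ [e]) e'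
        = pvSlices sd a cuts e ++ [PySem.List.slice sd (some e) (some e')] := by
  intro cuts
  induction cuts with
  | nil => intro a e e'; simp [pvSlices]
  | cons c cs ih => intro a e e'; simp [pvSlices, ih]

theorem pv_slices_update (sd : List String) (k : Nat) (d : String) (hk : sd[k]? = some d) :
    ∀ (cuts : List Int) (a : Int), 0 ≤ a → a ≤ (k : Int) →
      (∀ c ∈ cuts, 0 ≤ c ∧ c ≤ (k : Int)) →
      (pvSlices sd a cuts (k : Int)).dropLast
          ++ [(pvSlices sd a cuts (k : Int)).getLastD [] ++ [d]]
        = pvSlices sd a cuts ((k : Int) + 1) := by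
  intro cuts
  induction cuts with
  | nil =>
    intro a ha hak _
    simp [pvSlices, pv_slice_snoc sd a k d ha hak hk]
  | cons c cs ih =>
    intro a ha hak hb
    have hc := hb c List.mem_cons_self
    have hne := pv_slices_ne_nil sd c cs (k : Int)
    have h1 : (pvSlices sd a (c :: cs) (k : Int)).dropLast
        = PySem.List.slice sd (some a) (some c) :: (pvSlices sd c cs (k : Int)).dropLast := by
      simp [pvSlices, List.dropLast_cons_of_ne_nil hne]
    have h2 : (pvSlices sd a (c :: cs) (k : Int)).getLastD []
        = (pvSlices sd c cs (k : Int)).getLastD [] := by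
      cases hcs : pvSlices sd c cs (k : Int) with
      | nil => exact absurd hcs hne
      | cons y ys => simp [pvSlices, hcs]
    rw [h1, h2]
    show PySem.List.slice sd (some a) (some c)
        :: ((pvSlices sd c cs (k : Int)).dropLast ++ [(pvSlices sd c cs (k : Int)).getLastD [] ++ [d]])
      = pvSlices sd a (c :: cs) ((k : Int) + 1)
    rw [ih c hc.1 hc.2 (fun x hx => hb x (List.mem_cons_of_mem _ hx))]
    rfl

theorem pv_single_slice (sd : List String) (k : Nat) (d : String) (hk : sd[k]? = some d) :
    [d] = PySem.List.slice sd (some (k : Int)) (some ((k : Int) + 1)) := by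
  have h := pv_slice_snoc sd (k : Int) k d (Int.natCast_nonneg _) le_rfl hk
  have hz : PySem.List.slice sd (some (k : Int)) (some (k : Int)) = [] := by
    rw [PySem.List.slice_toNat (xs := sd) (a := (k : Int)) (b := (k : Int))
      (Int.natCast_nonneg _) (Int.natCast_nonneg _)]
    simp
  rw [← h, hz]
  simp

theorem pv_fold_segs (md : List (String × List (String × Int))) (sd : List String) :
    ∀ (l : List String) (k : Nat), l = sd.drop k →
    ∀ (prev : PySem.Set String) (cuts : List Int),
      (∀ c ∈ cuts, 0 ≤ c ∧ c < (k : Int)) →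
      l.foldl (pvStepBB md) (pvSlices sd 0 cuts (k : Int), prev, decide (cuts ≠ []))
        = (pvSlices sd 0 (((PySem.List.enumerate l (k : Int)).foldl (pvStepB md) (cuts, prev)).1)
            ((k + l.length : Nat) : Int),
           ((PySem.List.enumerate l (k : Int)).foldl (pvStepB md) (cuts, prev)).2,
           decide ((((PySem.List.enumerate l (k : Int)).foldl (pvStepB md) (cuts, prev)).1) ≠ [])) := by
  intro l
  induction l with
  | nil =>
    intro k hl prev cuts _
    simp [PySem.List.enumerate_nil]
  | cons d t ih =>
    intro k hl prev cuts hbd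
    have hget : sd[k]? = some d := by
      have h0 : (sd.drop k)[0]? = sd[k + 0]? := List.getElem?_drop
      rw [← hl] at h0
      simpa using h0.symm
    have ht : t = sd.drop (k + 1) := by
      rw [← List.tail_drop, ← hl]
      rfl
    have hcast : ((k : Int) + 1) = (((k + 1 : Nat)) : Int) := by push_cast; ring
    rw [PySem.List.enumerate_cons, List.foldl_cons, List.foldl_cons, hcast]
    by_cases h : pvUnits md d ≠ [] ∧ PySem.Set.equal (pvUnits md d) prev = false
    · have hBB : pvStepBB md (pvSlices sd 0 cuts (k : Int), prev, decide (cuts ≠ [])) d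
          = (pvSlices sd 0 cuts (k : Int) ++ [[d]], pvUnits md d, true) := by
        simp only [pvStepBB, if_pos h]
      have hB : pvStepB md (cuts, prev) (((k : Nat) : Int), d)
          = (cuts ++ [((k : Nat) : Int)], pvUnits md d) := by
        simp only [pvStepB, if_pos h]
      rw [hBB, hB]
      have hseg : pvSlices sd 0 cuts (k : Int) ++ [[d]]
          = pvSlices sd 0 (cuts ++ [((k : Nat) : Int)]) (((k + 1 : Nat)) : Int) := by
        rw [pv_slices_snoc, pv_single_slice sd k d hget, hcast]
      have htrue : (true : Bool) = decide ((cuts ++ [((k : Nat) : Int)]) ≠ []) := by simp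
      rw [hseg, htrue]
      have hbd' : ∀ c ∈ cuts ++ [((k : Nat) : Int)], 0 ≤ c ∧ c < (((k + 1 : Nat)) : Int) := by
        intro c hc
        rcases List.mem_append.1 hc with hc | hc
        · have := hbd c hc; push_cast at this ⊢; omega
        · simp only [List.mem_singleton] at hc; subst hc
          constructor
          · positivity
          · push_cast; omega
      have hres := ih (k + 1) ht (pvUnits md d) (cuts ++ [((k : Nat) : Int)]) hbd'
      have hlen : (k + 1) + t.length = k + (d :: t).length := by
        simp [List.length_cons]; omega
      rw [hlen] at hres
      exact hres
    · have hBB : pvStepBB md (pvSlices sd 0 cuts (k : Int), prev, decide (cuts ≠ [])) d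
          = ((pvSlices sd 0 cuts (k : Int)).dropLast
              ++ [(pvSlices sd 0 cuts (k : Int)).getLastD [] ++ [d]], prev, decide (cuts ≠ [])) := by
        simp only [pvStepBB, if_neg h]
      have hB : pvStepB md (cuts, prev) (((k : Nat) : Int), d) = (cuts, prev) := by
        simp only [pvStepB, if_neg h]
      rw [hBB, hB]
      have hupd := pv_slices_update sd k d hget cuts 0 le_rfl (Int.natCast_nonneg _)
        (fun c hc => ⟨(hbd c hc).1, le_of_lt (hbd c hc).2⟩)
      rw [hupd, hcast]
      have hbd' : ∀ c ∈ cuts, 0 ≤ c ∧ c < (((k + 1 : Nat)) : Int) := by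
        intro c hc
        have := hbd c hc; push_cast at this ⊢; omega
      have hres := ih (k + 1) ht prev cuts hbd'
      have hlen : (k + 1) + t.length = k + (d :: t).length := by
        simp [List.length_cons]; omega
      rw [hlen] at hres
      exact hres

theorem pv_slices_eq_zip (sd : List String) :
    ∀ (cuts : List Int) (a e : Int),
      pvSlices sd a cuts e
        = (((a :: (cuts ++ [e])).zip ((a :: (cuts ++ [e])).drop 1)).map
            (fun ab => PySem.List.slice sd (some ab.1) (some ab.2))) := by
  intro cuts
  induction cuts with
  | nil => intro a e; simp [pvSlices]
  | cons c cs ih =>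
    intro a e
    simp only [pvSlices, List.cons_append, List.drop_succ_cons, List.drop_zero,
      List.zip_cons_cons, List.map_cons]
    rw [ih c e]
    simp

theorem pv_zip_slices (sd : List String) (cuts : List Int) :
    pvZip sd cuts
      = ((pvSlices sd 0 cuts ((sd.length : Nat) : Int)).filter (fun p => p ≠ [])).take 3 := by
  unfold pvZip
  rw [pv_slices_eq_zip sd cuts 0 ((sd.length : Nat) : Int)]

theorem pv_main (md : List (String × List (String × Int))) (sd : List String)
    (h1 : (∀ d ∈ sd, pvUnits md d = [] ∨
            PySem.Set.equal (pvUnits md d) (pvUnits md (sd.headD "")) = true)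
          ∨ (∀ d ∈ sd, pvUnits md d ≠ [] → sd.count d = 1 ∧ d ≠ ""))
    (h2 : (∀ d ∈ sd, pvUnits md d = [] ∨
            PySem.Set.equal (pvUnits md d) (pvUnits md (sd.headD "")) = true) →
          3 ≤ sd.length →
          (sd.idxOf (sd.getD (sd.length / 3) "") = sd.length / 3
            ∧ sd.getD (sd.length / 3) "" ≠ ""
            ∧ sd.idxOf (sd.getD (2 * sd.length / 3) "") = 2 * sd.length / 3
            ∧ sd.getD (2 * sd.length / 3) "" ≠ "")) :
    pvA md sd = pvB md sd := by
  by_cases h0 : sd = []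
  · simp [pvA, pvB, h0]
  · unfold pvA pvB
    rw [if_neg h0, if_neg h0]
    obtain ⟨hbs, hbd, hcu⟩ := pv_fold_sync md sd sd 0 (by simp)
      (pvUnits md (sd.headD "")) [] [] (by simp) (by simp) (by simp)
    simp only [Nat.cast_zero, Nat.zero_add] at hbs hbd hcu
    have hsegs0 : ([([] : List String)] : List (List String))
        = pvSlices sd 0 [] (0 : Int) := by
      have hz : PySem.List.slice sd (some (0 : Int)) (some (0 : Int)) = [] := by
        rw [PySem.List.slice_toNat (xs := sd) (a := (0 : Int)) (b := (0 : Int)) le_rfl le_rfl]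
        simp
      simp [pvSlices, hz]
    have hfalse : (false : Bool) = decide (([] : List Int) ≠ []) := by simp
    have hsegs := pv_fold_segs md sd sd 0 (by simp) (pvUnits md (sd.headD "")) [] (by simp)
    simp only [Nat.cast_zero, Nat.zero_add] at hsegs
    rw [hsegs0, hfalse]
    rw [hsegs, hbs]
    by_cases hc : ((PySem.List.enumerate sd 0).foldl (pvStepB md) ([], pvUnits md (sd.headD ""))).1 = []
        ∧ 3 ≤ sd.length
    · rw [if_pos ⟨by rw [hc.1]; rfl, hc.2⟩, if_pos (⟨by rw [hc.1], hc.2⟩ :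
        ((pvSlices sd 0 (((PySem.List.enumerate sd 0).foldl (pvStepB md)
            ([], pvUnits md (sd.headD ""))).1) ((sd.length : Nat) : Int),
          ((PySem.List.enumerate sd 0).foldl (pvStepB md) ([], pvUnits md (sd.headD ""))).2,
          decide ((((PySem.List.enumerate sd 0).foldl (pvStepB md)
            ([], pvUnits md (sd.headD ""))).1) ≠ [])).2.2 = decide (([] : List Int) ≠ [])
          ∧ 3 ≤ sd.length))]
      have hnb : ∀ d ∈ sd, pvUnits md d = [] ∨
          PySem.Set.equal (pvUnits md d) (pvUnits md (sd.headD "")) = true := by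
        have := pv_nocut md sd 0 (pvUnits md (sd.headD ""))
          [] (by simpa using hc.1)
        exact this
      obtain ⟨hi1, hne1, hi2, hne2⟩ := h2 hnb hc.2
      have hm3 : 3 ≤ sd.length := hc.2
      have hlt1 : sd.length / 3 < sd.length := by omega
      have hlt2 : 2 * sd.length / 3 < sd.length := by omega
      have e0 : (0 : Int) ≤ (2 * sd.length / 3 : Nat) := Int.natCast_nonneg _
      have e1 : PySem.Int.floordiv ((sd.length : Nat) : Int) 3 = ((sd.length / 3 : Nat) : Int) := by
        exact_mod_cast PySem.Int.floordiv_natCast sd.length 3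
      have e2 : PySem.Int.floordiv (2 * ((sd.length : Nat) : Int)) 3
          = ((2 * sd.length / 3 : Nat) : Int) := by
        have : (2 * ((sd.length : Nat) : Int)) = (((2 * sd.length : Nat)) : Int) := by push_cast; ring
        rw [this]
        exact_mod_cast PySem.Int.floordiv_natCast (2 * sd.length) 3
      have hv1 : pvElemAt sd ((sd.length / 3 : Nat) : Int) = sd[sd.length / 3]'hlt1 := by
        have := pv_elem_eq sd ((sd.length / 3 : Nat) : Int) (by positivity) (by exact_mod_cast hlt1)
        simpa using this
      have hv2 : pvElemAt sd ((2 * sd.length / 3 : Nat) : Int) = sd[2 * sd.length / 3]'hlt2 := by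
        have := pv_elem_eq sd ((2 * sd.length / 3 : Nat) : Int) (by positivity) (by exact_mod_cast hlt2)
        simpa using this
      have hg1 : sd.getD (sd.length / 3) "" = sd[sd.length / 3]'hlt1 := List.getD_eq_getElem sd "" hlt1
      have hg2 : sd.getD (2 * sd.length / 3) "" = sd[2 * sd.length / 3]'hlt2 :=
        List.getD_eq_getElem sd "" hlt2
      have hcut : ∀ c ∈ [PySem.Int.floordiv ((sd.length : Nat) : Int) 3,
          PySem.Int.floordiv (2 * ((sd.length : Nat) : Int)) 3],
          0 ≤ c ∧ c < (sd.length : Int) ∧ pvElemAt sd c ≠ "" ∧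
          PySem.List.index? sd (pvElemAt sd c) = some c.toNat := by
        intro c hcm
        rcases List.mem_cons.1 hcm with rfl | hcm
        · rw [e1]
          refine ⟨by positivity, by exact_mod_cast hlt1, ?_, ?_⟩
          · rw [hv1, ← hg1]; exact hne1
          · rw [hv1, Int.toNat_natCast]
            exact pv_index_mem sd _ hlt1 (by rw [← hg1]; exact hi1)
        · simp only [List.mem_singleton] at hcm; subst hcm
          rw [e2]
          refine ⟨by positivity, by exact_mod_cast hlt2, ?_, ?_⟩
          · rw [hv2, ← hg2]; exact hne2
          · rw [hv2, Int.toNat_natCast]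
            exact pv_index_mem sd _ hlt2 (by rw [← hg2]; exact hi2)
      have hA := pv_zip_eq sd
        [PySem.Int.floordiv ((sd.length : Nat) : Int) 3,
         PySem.Int.floordiv (2 * ((sd.length : Nat) : Int)) 3] hcut
      have hAe : pvSliceLoop sd
          [pvElemAt sd (PySem.Int.floordiv ((sd.length : Nat) : Int) 3),
           pvElemAt sd (PySem.Int.floordiv (2 * ((sd.length : Nat) : Int)) 3)]
          = pvZip sd [PySem.Int.floordiv ((sd.length : Nat) : Int) 3,
              PySem.Int.floordiv (2 * ((sd.length : Nat) : Int)) 3] := by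
        simpa using hA
      rw [hAe, pv_zip_slices]
      -- both sides are the three thirds slices, filtered and truncated
      simp only [pvSlices]
      rw [pv_slice_from_eq sd (PySem.Int.floordiv (2 * ((sd.length : Nat) : Int)) 3) (by rw [e2]; exact e0)]
      simp
    · rw [if_neg (by
        intro hcon
        exact hc ⟨List.map_eq_nil_iff.mp hcon.1, hcon.2⟩),
        if_neg (by
          intro hcon
          exact hc ⟨by simpa using hcon.1, hcon.2⟩)]
      -- reduce to the old pv_zip_eq equality with the slice characterisation
      have : pvSliceLoop sd ((((PySem.List.enumerate sd 0).foldl (pvStepB md)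
          ([], pvUnits md (sd.headD ""))).1).map (pvElemAt sd))
          = pvZip sd (((PySem.List.enumerate sd 0).foldl (pvStepB md)
              ([], pvUnits md (sd.headD ""))).1) := by
        apply pv_zip_eq
        intro c hcm
        have hb := hbd c hcm
        have hu := hcu c hcm
        have hcn : c.toNat < sd.length := by omega
        have hbe : pvElemAt sd c = sd[c.toNat]'hcn := pv_elem_eq sd c hb.1 hb.2
        have hmem : pvElemAt sd c ∈ sd := by rw [hbe]; exact List.getElem_mem hcn
        have hnn : ¬ (∀ d ∈ sd, pvUnits md d = [] ∨
            PySem.Set.equal (pvUnits md d) (pvUnits md (sd.headD "")) = true) := by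
          intro hnb
          have hz := pv_nobreak_nocut md sd sd 0 [] hnb
          simp only [Nat.cast_zero] at hz
          rw [hz] at hcm
          exact absurd hcm List.not_mem_nil
        obtain ⟨hcnt, hne⟩ := (h1.resolve_left hnn) (pvElemAt sd c) hmem hu
        refine ⟨hb.1, hb.2, hne, ?_⟩
        rw [hbe]
        exact pv_index_count sd c.toNat hcn (by rw [← hbe]; exact hcnt)
      rw [this, pv_zip_slices]


theorem pvA_eq (md : List (String × List (String × Int))) (sd : List String) :
    split_periods_3 md sd = pvA md sd := rfl

theorem pvB_eq (md : List (String × List (String × Int))) (sd : List String) :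
    split_periods_3_alt md sd = pvB md sd := rfl

-- ===== VERDICT (by name: the statement is the Claim_ definition above) =====
theorem split_periods_3_spec : Claim_equal_split_periods_3 := by
  intro md sd _ hpre
  unfold Spec_split_periods_3
  rw [pvA_eq, pvB_eq]
  exact pv_main md sd hpre.1 hpre.2
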